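-- pv_equiv track=rewrite | github.com/sfchick23/MyPreparation-olimpida | testProject/Task8.py | max_prime_factor_power
-- ===== SOURCE A (Python) =====
-- import math
--
-- def max_prime_factor_power(N):
--     max_power = 0
--     for i in range(2, int(math.sqrt(N)) + 1):
--         power = 0
--         while N % i == 0:
--             N //= i
--             power += 1
--         max_power = max(max_power, power)
--
--     if N > 1:
--         max_power = max(max_power, 1)
--
--     return max_power
-- ===== SOURCE B (Python) =====
-- def max_prime_factor_power(N):
--     # Build the flat multiset of prime factors (one factor removed per step,
--     # no exponent bookkeeping during division), then the answer is the
--     # highest multiplicity in that multiset.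
--     factors = []
--     n, d = N, 2
--     while d * d <= n:
--         if n % d == 0:
--             n //= d
--             factors.append(d)
--         else:
--             d += 1
--     if n > 1:
--         factors.append(n)
--     return max((factors.count(p) for p in factors), default=0)
-- ===== Notes on version B (the rewrite author's own statement) =====
-- stated objective: alternative
-- what changed: B replaces A's nested strip-and-running-max scan over a fixed range up to isqrt(N) by a single flat loop that removes one prime factor per step into a multiset list (no exponent variable, no inner while), and obtains the answer afterwards as the highest multiplicity in that multiset via a count-based max reduction (empty multiset yielding the zero default).
import Mathlib
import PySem

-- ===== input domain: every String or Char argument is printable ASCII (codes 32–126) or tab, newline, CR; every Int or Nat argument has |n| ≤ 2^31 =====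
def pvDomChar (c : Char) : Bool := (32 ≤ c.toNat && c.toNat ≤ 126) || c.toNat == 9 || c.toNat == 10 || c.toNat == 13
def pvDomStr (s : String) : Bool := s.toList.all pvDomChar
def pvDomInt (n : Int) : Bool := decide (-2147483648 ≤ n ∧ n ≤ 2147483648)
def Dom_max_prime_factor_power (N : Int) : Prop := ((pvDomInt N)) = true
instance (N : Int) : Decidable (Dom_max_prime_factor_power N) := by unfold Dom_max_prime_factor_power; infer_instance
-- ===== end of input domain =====

-- B builds the flat multiset of prime factors (one factor removed per loop step, no inner
-- while and no exponent variable) and returns the highest multiplicity in that multiset.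

-- ===== PORT A =====
-- inner 'while N % i == 0: N //= i; power += 1'; the fuel (n.toNat at the call site) and the
-- guards 2 ≤ i, 1 ≤ n only make the recursion total: Python diverges outside the guards and A
-- never reaches them, and the value strictly shrinks each step so the fuel is never exhausted
def stripAGo (i : Int) : Nat → Int → Int → Int × Int
  | 0, n, pw => (n, pw)
  | Nat.succ k, n, pw =>
    if 2 ≤ i ∧ 1 ≤ n ∧ PySem.Int.mod n i = 0 then
      stripAGo i k (PySem.Int.floordiv n i) (pw + 1)
    else (n, pw)

def stripA (i n pw : Int) : Int × Int := stripAGo i n.toNat n pw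

def max_prime_factor_power (N : Int) : Int :=
  -- int(math.sqrt(N)) ported as the integer square root: exact for 0 ≤ N ≤ 2^31,
  -- where the correctly rounded double sqrt truncates to isqrt(N)
  let r : Int := (Nat.sqrt N.toNat : Int)
  let st := (PySem.List.pyRange 2 (r + 1) 1).foldl
      (fun (st : Int × Int) j => let s := stripA j st.1 0; (s.1, max st.2 s.2)) (N, 0)
  if st.1 > 1 then max st.2 1 else st.2

-- ===== PORT B =====
-- outer 'while d*d <= n' removing ONE factor (or incrementing d) per step; the fuel
-- (2*n + 1 - d).toNat and the guard 2 ≤ d only make the recursion total: while the loop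
-- guard holds the measure 2n+1-d stays positive and strictly shrinks on both branches
def bflatGo : Nat → Int → Int → List Int → Int × List Int
  | 0, n, _, fs => (n, fs)
  | Nat.succ F, n, d, fs =>
    if 2 ≤ d ∧ d * d ≤ n then
      (if PySem.Int.mod n d = 0 then
        bflatGo F (PySem.Int.floordiv n d) d (fs ++ [d])
      else bflatGo F n (d + 1) fs)
    else (n, fs)

def bflat (n d : Int) (fs : List Int) : Int × List Int :=
  bflatGo (2 * n + 1 - d).toNat n d fs

def max_prime_factor_power_alt (N : Int) : Int :=
  let s := bflat N 2 []
  let factors := if s.1 > 1 then s.2 ++ [s.1] else s.2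
  -- max((factors.count(p) for p in factors), default=0)
  PySem.List.maxD (factors.map (fun p => ((PySem.List.count factors p : Nat) : Int))) (fun y => y) 0

-- ===== PRECONDITION & SPEC =====
-- Pre_ excludes exactly N < 0, where math.sqrt(N) raises ValueError in A.
def Pre_max_prime_factor_power (N : Int) : Prop := 0 ≤ N
instance (N : Int) : Decidable (Pre_max_prime_factor_power N) := by
  unfold Pre_max_prime_factor_power; infer_instance
def pvWitness_max_prime_factor_power : Int := 360

def Spec_max_prime_factor_power (N : Int) (out : Int) : Prop := out = max_prime_factor_power_alt N
instance (N : Int) (out : Int) : Decidable (Spec_max_prime_factor_power N out) := by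
  unfold Spec_max_prime_factor_power; infer_instance

-- ===== CLAIM (what is proved, stated in full; the proofs are below) =====
def Claim_equal_max_prime_factor_power : Prop := ∀ (N : Int), Dom_max_prime_factor_power N → Pre_max_prime_factor_power N → Spec_max_prime_factor_power N (max_prime_factor_power N)

-- ===== LEMMAS AND PROOFS =====

-- arithmetic fact used by the strip lemmas
theorem pvEdivLt (n i : Int) (h1 : 1 ≤ n) (hi : 2 ≤ i) : n / i < n := by
  have ha : n = ((n.toNat : Int)) := by omega
  have hb : i = ((i.toNat : Int)) := by omega
  rw [ha, hb]
  have h2 : ((n.toNat : Int)) / ((i.toNat : Int)) = ((n.toNat / i.toNat : Nat) : Int) := by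
    exact_mod_cast (Int.natCast_div n.toNat i.toNat).symm
  rw [h2]
  have := Nat.div_lt_self (by omega : 0 < n.toNat) (by omega : 1 < i.toNat)
  exact_mod_cast this

-- facts about the inner while loop (fuel k suffices whenever n.toNat ≤ k)
theorem stripAGo_facts (i : Int) : ∀ (k : Nat) (n : Int), n.toNat ≤ k → ∀ e, 2 ≤ i → 1 ≤ n →
    (1 ≤ (stripAGo i k n e).1 ∧ (stripAGo i k n e).1 ≤ n) ∧
    (stripAGo i k n e).1 ∣ n ∧ ¬ i ∣ (stripAGo i k n e).1 ∧ e ≤ (stripAGo i k n e).2 := by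
  intro k
  induction k with
  | zero => intro n hk e hi h1; omega
  | succ k ih =>
    intro n hk e hi h1
    simp only [stripAGo]
    split
    · next h =>
      rcases h with ⟨_, _, hm⟩
      have hdvd : i ∣ n := (PySem.Int.mod_eq_zero_iff_dvd n i).1 hm
      rw [PySem.Int.floordiv_eq_ediv_of_pos (by omega)]
      have h1' : 1 ≤ n / i := by
        rcases hdvd with ⟨c, rfl⟩
        rw [Int.mul_ediv_cancel_left _ (by omega)]
        nlinarith
      have hlt : n / i < n := pvEdivLt n i h1 hi
      have hdd : n / i ∣ n := by
        rcases hdvd with ⟨c, rfl⟩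
        rw [Int.mul_ediv_cancel_left _ (by omega)]
        exact ⟨i, mul_comm i c⟩
      obtain ⟨⟨ha1, ha2⟩, hb, hc, hd⟩ := ih (n / i) (by omega) (e + 1) hi h1'
      exact ⟨⟨ha1, by omega⟩, dvd_trans hb hdd, hc, by omega⟩
    · next h =>
      refine ⟨⟨h1, le_rfl⟩, dvd_rfl, ?_, le_rfl⟩
      intro hdvd
      exact h ⟨hi, h1, (PySem.Int.mod_eq_zero_iff_dvd n i).2 hdvd⟩

theorem stripA_facts (i n e : Int) (hi : 2 ≤ i) (h1 : 1 ≤ n) :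
    (1 ≤ (stripA i n e).1 ∧ (stripA i n e).1 ≤ n) ∧
    (stripA i n e).1 ∣ n ∧ ¬ i ∣ (stripA i n e).1 ∧ e ≤ (stripA i n e).2 :=
  stripAGo_facts i n.toNat n le_rfl e hi h1

-- the inner loop's result does not depend on the fuel once the fuel is sufficient
theorem stripAGo_irrel (i : Int) : ∀ (k : Nat), ∀ (k' : Nat) (n e : Int), n.toNat ≤ k →
    n.toNat ≤ k' → 1 ≤ n → stripAGo i k n e = stripAGo i k' n e := by
  intro k
  induction k with
  | zero => intro k' n e hk hk' h1; omega
  | succ k ih =>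
    intro k' n e hk hk' h1
    cases k' with
    | zero => omega
    | succ k' =>
      simp only [stripAGo]
      by_cases h : 2 ≤ i ∧ 1 ≤ n ∧ PySem.Int.mod n i = 0
      · rw [if_pos h, if_pos h]
        rcases h with ⟨hi, _, hm⟩
        have hdvd : i ∣ n := (PySem.Int.mod_eq_zero_iff_dvd n i).1 hm
        rw [PySem.Int.floordiv_eq_ediv_of_pos (by omega)]
        have h1' : 1 ≤ n / i := by
          rcases hdvd with ⟨c, rfl⟩
          rw [Int.mul_ediv_cancel_left _ (by omega)]
          nlinarith
        have hlt : n / i < n := pvEdivLt n i h1 hi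
        exact ih k' (n / i) (e + 1) (by omega) (by omega) h1'
      · rw [if_neg h, if_neg h]

-- the accumulator of the inner loop is a pure offset
theorem stripAGo_shift (i : Int) : ∀ (k : Nat) (n e : Int),
    stripAGo i k n e = ((stripAGo i k n 0).1, e + (stripAGo i k n 0).2) := by
  intro k
  induction k with
  | zero => intro n e; simp [stripAGo]
  | succ k ih =>
    intro n e
    simp only [stripAGo]
    by_cases h : 2 ≤ i ∧ 1 ≤ n ∧ PySem.Int.mod n i = 0
    · rw [if_pos h, if_pos h]
      rw [ih (PySem.Int.floordiv n i) (e + 1), ih (PySem.Int.floordiv n i) (0 + 1)]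
      refine Prod.ext rfl ?_
      dsimp only
      ring
    · rw [if_neg h, if_neg h]
      simp

-- one full divide step of the inner loop
theorem stripA_step (i n : Int) (hi : 2 ≤ i) (h1 : 1 ≤ n)
    (hm : PySem.Int.mod n i = 0) :
    stripA i n 0 = ((stripA i (PySem.Int.floordiv n i) 0).1,
                    (stripA i (PySem.Int.floordiv n i) 0).2 + 1) := by
  have hdvd : i ∣ n := (PySem.Int.mod_eq_zero_iff_dvd n i).1 hm
  have hfd : PySem.Int.floordiv n i = n / i := PySem.Int.floordiv_eq_ediv_of_pos (by omega)
  have h1' : 1 ≤ n / i := by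
    rcases hdvd with ⟨c, rfl⟩
    rw [Int.mul_ediv_cancel_left _ (by omega)]
    nlinarith
  have hlt : n / i < n := pvEdivLt n i h1 hi
  have hk : n.toNat = (n.toNat - 1) + 1 := by omega
  unfold stripA
  rw [hk]
  simp only [stripAGo]
  rw [if_pos ⟨hi, h1, hm⟩]
  rw [show (0 : Int) + 1 = 1 from by norm_num]
  rw [stripAGo_irrel i (n.toNat - 1) ((PySem.Int.floordiv n i).toNat)
    (PySem.Int.floordiv n i) 1 (by omega) le_rfl (by omega)]
  rw [stripAGo_shift i ((PySem.Int.floordiv n i).toNat) (PySem.Int.floordiv n i) 1]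
  refine Prod.ext rfl ?_
  dsimp only
  ring

theorem stripA_snd_pos (i n : Int) (hi : 2 ≤ i) (h1 : 1 ≤ n)
    (hm : PySem.Int.mod n i = 0) : 1 ≤ (stripA i n 0).2 := by
  rw [stripA_step i n hi h1 hm]
  have hdvd : i ∣ n := (PySem.Int.mod_eq_zero_iff_dvd n i).1 hm
  have hfd : PySem.Int.floordiv n i = n / i := PySem.Int.floordiv_eq_ediv_of_pos (by omega)
  have h1' : 1 ≤ n / i := by
    rcases hdvd with ⟨c, rfl⟩
    rw [Int.mul_ediv_cancel_left _ (by omega)]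
    nlinarith
  have := (stripA_facts i (PySem.Int.floordiv n i) 0 hi (by omega)).2.2.2
  dsimp only
  omega

theorem stripA_fst_lt (i n e : Int) (hi : 2 ≤ i) (h1 : 1 ≤ n)
    (hm : PySem.Int.mod n i = 0) : (stripA i n e).1 < n := by
  have hdvd : i ∣ n := (PySem.Int.mod_eq_zero_iff_dvd n i).1 hm
  have hfd : PySem.Int.floordiv n i = n / i := PySem.Int.floordiv_eq_ediv_of_pos (by omega)
  have h1' : 1 ≤ n / i := by
    rcases hdvd with ⟨c, rfl⟩
    rw [Int.mul_ediv_cancel_left _ (by omega)]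
    nlinarith
  have hlt : n / i < n := pvEdivLt n i h1 hi
  have hk : n.toNat = (n.toNat - 1) + 1 := by omega
  unfold stripA
  rw [hk]
  simp only [stripAGo]
  rw [if_pos ⟨hi, h1, hm⟩]
  have := (stripAGo_facts i (n.toNat - 1) (PySem.Int.floordiv n i) (by omega) (e + 1) hi (by omega)).1
  omega

theorem stripA_no_dvd_eq (i n e : Int) (h : ¬ i ∣ n) : stripA i n e = (n, e) := by
  unfold stripA
  cases hk : n.toNat with
  | zero => rfl
  | succ k =>
    simp only [stripAGo]
    rw [if_neg (by rintro ⟨_, _, hm⟩; exact h ((PySem.Int.mod_eq_zero_iff_dvd n i).1 hm))]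

theorem stripA_self (i : Int) (hi : 2 ≤ i) : stripA i i 0 = (1, 1) := by
  have hk : i.toNat = (i.toNat - 1) + 1 := by omega
  unfold stripA
  rw [hk]
  simp only [stripAGo]
  rw [if_pos ⟨hi, by omega, (PySem.Int.mod_eq_zero_iff_dvd i i).2 dvd_rfl⟩]
  rw [PySem.Int.floordiv_eq_ediv_of_pos (by omega), Int.ediv_self (by omega)]
  have h1 : ¬ i ∣ (1 : Int) := fun h => by have := Int.le_of_dvd (by omega) h; omega
  cases hk1 : i.toNat - 1 with
  | zero => omega
  | succ k =>
    simp only [stripAGo]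
    rw [if_neg (by rintro ⟨_, _, hm⟩; exact h1 ((PySem.Int.mod_eq_zero_iff_dvd 1 i).1 hm))]
    norm_num

-- with fuel 0 justified ((2n+1-d) ≤ 0) the flat loop guard is false
theorem bguard_false (n d : Int) (hd : 2 ≤ d) (hnd : 2 * n + 1 - d ≤ 0) :
    ¬ (2 ≤ d ∧ d * d ≤ n) := by
  rintro ⟨_, hdd⟩
  nlinarith

-- the flat loop's result does not depend on the fuel, once the fuel is sufficient
theorem bflatGo_irrel : ∀ (F : Nat), ∀ (F' : Nat) (n d : Int) (fs : List Int), 2 ≤ d →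
    (2 * n + 1 - d).toNat ≤ F → (2 * n + 1 - d).toNat ≤ F' →
    bflatGo F n d fs = bflatGo F' n d fs := by
  intro F
  induction F with
  | zero =>
    intro F' n d fs hd hF hF'
    cases F' with
    | zero => rfl
    | succ F' =>
      simp only [bflatGo]
      rw [if_neg (bguard_false n d hd (by omega))]
  | succ F ih =>
    intro F' n d fs hd hF hF'
    cases F' with
    | zero =>
      simp only [bflatGo]
      rw [if_neg (bguard_false n d hd (by omega))]
    | succ F' =>
      simp only [bflatGo]
      by_cases h : 2 ≤ d ∧ d * d ≤ n
      · rw [if_pos h, if_pos h]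
        rcases h with ⟨_, hdd⟩
        have h1 : 1 ≤ n := by nlinarith
        have hdn : d ≤ n := by nlinarith
        by_cases hmod : PySem.Int.mod n d = 0
        · rw [if_pos hmod, if_pos hmod]
          have hdvd : d ∣ n := (PySem.Int.mod_eq_zero_iff_dvd n d).1 hmod
          have hfd : PySem.Int.floordiv n d = n / d := PySem.Int.floordiv_eq_ediv_of_pos (by omega)
          have hlt : n / d < n := pvEdivLt n d h1 hd
          have h1' : 1 ≤ n / d := by
            rcases hdvd with ⟨c, rfl⟩
            rw [Int.mul_ediv_cancel_left _ (by omega)]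
            nlinarith
          rw [hfd]
          exact ih F' (n / d) d _ hd (by omega) (by omega)
        · rw [if_neg hmod, if_neg hmod]
          exact ih F' n (d + 1) fs (by omega) (by omega) (by omega)
      · rw [if_neg h, if_neg h]

-- the accumulator of the flat loop is append-only
theorem bflatGo_acc : ∀ (F : Nat) (n d : Int) (fs : List Int),
    bflatGo F n d fs = ((bflatGo F n d []).1, fs ++ (bflatGo F n d []).2) := by
  intro F
  induction F with
  | zero => intro n d fs; simp [bflatGo]
  | succ F ih =>
    intro n d fs
    simp only [bflatGo]
    by_cases h : 2 ≤ d ∧ d * d ≤ n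
    · rw [if_pos h, if_pos h]
      by_cases hmod : PySem.Int.mod n d = 0
      · rw [if_pos hmod, if_pos hmod]
        rw [ih (PySem.Int.floordiv n d) d (fs ++ [d]),
            ih (PySem.Int.floordiv n d) d ([] ++ [d])]
        simp
      · rw [if_neg hmod, if_neg hmod]
        exact ih n (d + 1) fs
    · rw [if_neg h, if_neg h]
      simp

-- cofactor and produced factors all divide the current value
theorem bflatGo_facts : ∀ (F : Nat) (n d : Int) (fs : List Int), 2 ≤ d → 1 ≤ n →
    (1 ≤ (bflatGo F n d fs).1 ∧ (bflatGo F n d fs).1 ∣ n) ∧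
    (∀ x ∈ (bflatGo F n d fs).2, x ∈ fs ∨ x ∣ n) := by
  intro F
  induction F with
  | zero => intro n d fs hd h1; exact ⟨⟨h1, dvd_rfl⟩, fun x hx => Or.inl hx⟩
  | succ F ih =>
    intro n d fs hd h1
    simp only [bflatGo]
    by_cases h : 2 ≤ d ∧ d * d ≤ n
    · rw [if_pos h]
      rcases h with ⟨_, hdd⟩
      by_cases hmod : PySem.Int.mod n d = 0
      · rw [if_pos hmod]
        have hdvd : d ∣ n := (PySem.Int.mod_eq_zero_iff_dvd n d).1 hmod
        have hfd : PySem.Int.floordiv n d = n / d := PySem.Int.floordiv_eq_ediv_of_pos (by omega)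
        have h1' : 1 ≤ n / d := by
          rcases hdvd with ⟨c, rfl⟩
          rw [Int.mul_ediv_cancel_left _ (by omega)]
          nlinarith
        have hdd' : n / d ∣ n := by
          rcases hdvd with ⟨c, rfl⟩
          rw [Int.mul_ediv_cancel_left _ (by omega)]
          exact ⟨d, mul_comm d c⟩
        rw [hfd]
        obtain ⟨⟨ha, hb⟩, hc⟩ := ih (n / d) d (fs ++ [d]) hd h1'
        refine ⟨⟨ha, dvd_trans hb hdd'⟩, fun x hx => ?_⟩
        rcases hc x hx with hx' | hx'
        · rcases List.mem_append.1 hx' with hx'' | hx''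
          · exact Or.inl hx''
          · simp at hx''; subst hx''; exact Or.inr hdvd
        · exact Or.inr (dvd_trans hx' hdd')
      · rw [if_neg hmod]
        exact ih n (d + 1) fs (by omega) h1
    · rw [if_neg h]
      exact ⟨⟨h1, dvd_rfl⟩, fun x hx => Or.inl hx⟩

-- proof-side view of B's factor list: produced factors plus the leftover cofactor
def Lfull (n d : Int) : List Int :=
  (bflat n d []).2 ++ (if (bflat n d []).1 > 1 then [(bflat n d []).1] else [])

theorem Lfull_dvd (n d : Int) (hd : 2 ≤ d) (h1 : 1 ≤ n) :
    ∀ x ∈ Lfull n d, x ∣ n := by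
  intro x hx
  obtain ⟨⟨_, hcof⟩, hels⟩ := bflatGo_facts ((2 * n + 1 - d).toNat) n d [] hd h1
  unfold Lfull bflat at hx
  rcases List.mem_append.1 hx with hx' | hx'
  · rcases hels x hx' with h' | h'
    · simp at h'
    · exact h'
  · split at hx'
    · simp at hx'; subst hx'; exact hcof
    · simp at hx'

-- proof-side value of B's final reduction
def mc (L : List Int) : Int :=
  PySem.List.maxD (L.map (fun p => ((PySem.List.count L p : Nat) : Int))) (fun y => y) 0

theorem alt_eq (N : Int) : max_prime_factor_power_alt N = mc (Lfull N 2) := by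
  unfold max_prime_factor_power_alt mc Lfull
  by_cases h : (bflat N 2 []).1 > 1 <;> simp [h]

-- B's one-divide-step unfolding: Lfull n d = d :: Lfull (n//d) d
theorem Lfull_unfold_div (n d : Int) (hd : 2 ≤ d) (h1 : 1 ≤ n) (hdd : d * d ≤ n)
    (hm : PySem.Int.mod n d = 0) :
    Lfull n d = d :: Lfull (PySem.Int.floordiv n d) d := by
  have hdvd : d ∣ n := (PySem.Int.mod_eq_zero_iff_dvd n d).1 hm
  have hfd : PySem.Int.floordiv n d = n / d := PySem.Int.floordiv_eq_ediv_of_pos (by omega)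
  have h1' : 1 ≤ n / d := by
    rcases hdvd with ⟨c, rfl⟩
    rw [Int.mul_ediv_cancel_left _ (by omega)]
    nlinarith
  have hlt : n / d < n := pvEdivLt n d h1 hd
  have hdn : d ≤ n := by nlinarith
  have hF : (2 * n + 1 - d).toNat = ((2 * n + 1 - d).toNat - 1) + 1 := by omega
  have hstep : bflat n d [] =
      ((bflat (PySem.Int.floordiv n d) d []).1,
        [d] ++ (bflat (PySem.Int.floordiv n d) d []).2) := by
    unfold bflat
    rw [hF]
    simp only [bflatGo]
    rw [if_pos ⟨hd, hdd⟩, if_pos hm]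
    rw [bflatGo_irrel ((2 * n + 1 - d).toNat - 1)
      ((2 * (PySem.Int.floordiv n d) + 1 - d).toNat) (PySem.Int.floordiv n d) d ([] ++ [d])
      hd (by rw [hfd]; omega) le_rfl]
    rw [bflatGo_acc ((2 * (PySem.Int.floordiv n d) + 1 - d).toNat) (PySem.Int.floordiv n d) d ([] ++ [d])]
    simp
  unfold Lfull
  rw [hstep]
  simp

theorem Lfull_stop (n d : Int) (h : ¬ (2 ≤ d ∧ d * d ≤ n)) :
    Lfull n d = if n > 1 then [n] else [] := by
  have hb : bflat n d [] = (n, []) := by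
    unfold bflat
    cases hF : (2 * n + 1 - d).toNat with
    | zero => rfl
    | succ F => simp only [bflatGo]; rw [if_neg h]
  unfold Lfull
  rw [hb]
  split <;> simp

theorem Lfull_skip (n d : Int) (hd : 2 ≤ d) (hdd : d * d ≤ n)
    (hm : ¬ PySem.Int.mod n d = 0) : Lfull n d = Lfull n (d + 1) := by
  have h1 : 1 ≤ n := by nlinarith
  have hdn : d ≤ n := by nlinarith
  have hF : (2 * n + 1 - d).toNat = ((2 * n + 1 - d).toNat - 1) + 1 := by omega
  have hstep : bflat n d [] = bflat n (d + 1) [] := by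
    unfold bflat
    rw [hF]
    simp only [bflatGo]
    rw [if_pos ⟨hd, hdd⟩, if_neg hm]
    exact bflatGo_irrel ((2 * n + 1 - d).toNat - 1) ((2 * n + 1 - (d + 1)).toNat)
      n (d + 1) [] (by omega) (by omega) le_rfl
  unfold Lfull
  rw [hstep]

-- the block decomposition: a full prime block of B's list is replicate (exponent) d
theorem Lfull_divide : ∀ (m : Nat) (n d : Int), n.toNat ≤ m → 2 ≤ d → 1 ≤ n →
    d * d ≤ n → PySem.Int.mod n d = 0 → (∀ j, 2 ≤ j → j < d → ¬ j ∣ n) →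
    Lfull n d = List.replicate (stripA d n 0).2.toNat d ++ Lfull (stripA d n 0).1 (d + 1) := by
  intro m
  induction m with
  | zero => intro n d hm hd h1 hdd hmod hinv; omega
  | succ m ih =>
    intro n d hm hd h1 hdd hmod hinv
    have hdvd : d ∣ n := (PySem.Int.mod_eq_zero_iff_dvd n d).1 hmod
    have hfd : PySem.Int.floordiv n d = n / d := PySem.Int.floordiv_eq_ediv_of_pos (by omega)
    have h1' : 1 ≤ n / d := by
      rcases hdvd with ⟨c, rfl⟩
      rw [Int.mul_ediv_cancel_left _ (by omega)]
      nlinarith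
    have hlt : n / d < n := pvEdivLt n d h1 hd
    have hdd'' : n / d ∣ n := by
      rcases hdvd with ⟨c, rfl⟩
      rw [Int.mul_ediv_cancel_left _ (by omega)]
      exact ⟨d, mul_comm d c⟩
    have hstep := stripA_step d n hd h1 hmod
    have hunf := Lfull_unfold_div n d hd h1 hdd hmod
    by_cases hmod' : PySem.Int.mod (n / d) d = 0
    · -- d still divides the cofactor
      have hdvd' : d ∣ n / d := (PySem.Int.mod_eq_zero_iff_dvd (n / d) d).1 hmod'
      by_cases hdd' : d * d ≤ n / d
      · -- recurse on the cofactor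
        have hIH := ih (n / d) d (by omega) hd h1' hdd' hmod'
          (fun j hj hjd hjdvd => hinv j hj hjd (dvd_trans hjdvd hdd''))
        have hE : 1 ≤ (stripA d (n / d) 0).2 := stripA_snd_pos d (n / d) hd h1' hmod'
        rw [hunf, hfd, hIH, hstep, hfd]
        have hrep : (((stripA d (n / d) 0).2 + 1).toNat) = (stripA d (n / d) 0).2.toNat + 1 := by
          omega
        dsimp only
        rw [hrep, List.replicate_succ]
        simp
      · -- the cofactor is d·t with t < d; the invariant forces t = 1, so n = d^2
        have ht1 : n / d = d := by
          rcases hdvd' with ⟨t, ht⟩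
          have htpos : 1 ≤ t := by nlinarith
          have htd : t < d := by nlinarith
          have htn : t ∣ n := dvd_trans ⟨d, by rw [ht]; ring⟩ hdd''
          have ht1' : t = 1 := by
            by_contra htne
            exact hinv t (by omega) htd htn
          rw [ht1', mul_one] at ht
          exact ht
        have hsd : stripA d (n / d) 0 = (1, 1) := by rw [ht1]; exact stripA_self d hd
        rw [hunf, hfd, hstep, hfd, hsd]
        dsimp only
        have hL1 : Lfull (n / d) d = [d] := by
          rw [Lfull_stop (n / d) d (by rintro ⟨_, h⟩; rw [ht1] at h; nlinarith)]
          rw [ht1]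
          rw [if_pos (by omega)]
        have hL2 : Lfull 1 (d + 1) = [] := by
          rw [Lfull_stop 1 (d + 1) (by rintro ⟨_, h⟩; nlinarith)]
          norm_num
        rw [hL1, hL2]
        simp [List.replicate_succ]
    · -- the block is a single factor d
      have hnd' : ¬ d ∣ n / d := fun hdd' => hmod' ((PySem.Int.mod_eq_zero_iff_dvd (n / d) d).2 hdd')
      have hsd : stripA d (n / d) 0 = (n / d, 0) := stripA_no_dvd_eq d (n / d) 0 hnd'
      rw [hunf, hfd, hstep, hfd, hsd]
      dsimp only
      have htail : Lfull (n / d) d = Lfull (n / d) (d + 1) := by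
        by_cases hdd' : d * d ≤ n / d
        · exact Lfull_skip (n / d) d hd hdd' hmod'
        · rw [Lfull_stop (n / d) d (by rintro ⟨_, h⟩; exact hdd' h),
              Lfull_stop (n / d) (d + 1) (by rintro ⟨_, h⟩; nlinarith)]
      rw [htail]
      simp [List.replicate_succ]

-- foldl max 0 is the proof-side value of max(…, default=0)
theorem foldl_max_comm : ∀ (l : List Int) (a b : Int),
    l.foldl max (max a b) = max a (l.foldl max b) := by
  intro l
  induction l with
  | nil => intro a b; rfl
  | cons x t ih =>
    intro a b
    simp only [List.foldl_cons, max_assoc, ih]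

theorem maxD_eq_foldl (l : List Int) (h : ∀ x ∈ l, (0 : Int) ≤ x) :
    PySem.List.maxD l (fun y => y) 0 = l.foldl max 0 := by
  cases l with
  | nil => rfl
  | cons x t =>
    have hx : max (0 : Int) x = x := max_eq_right (h x (by simp))
    simp only [PySem.List.maxD, PySem.List.max?_id_cons, Option.getD_some,
      List.foldl_cons, hx]

theorem foldl_max_append (X Y : List Int) :
    (X ++ Y).foldl max 0 = max (X.foldl max 0) (Y.foldl max 0) := by
  have h0 : (0 : Int) ≤ X.foldl max 0 := (PySem.List.le_foldl_max X 0).1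
  rw [List.foldl_append]
  have h1 : X.foldl max 0 = max (X.foldl max 0) 0 := (max_eq_left h0).symm
  conv_lhs => rw [h1]
  exact foldl_max_comm Y _ 0

theorem foldl_max_replicate (k : Nat) (c : Int) (hk : 1 ≤ k) (hc : 0 ≤ c) :
    (List.replicate k c).foldl max 0 = c := by
  have hgen : ∀ (j : Nat), (List.replicate j c).foldl max c = c := by
    intro j
    induction j with
    | zero => rfl
    | succ j ihj => simp [List.replicate_succ, List.foldl_cons, ihj]
  cases k with
  | zero => omega
  | succ k =>
    simp only [List.replicate_succ, List.foldl_cons]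
    rw [max_eq_right hc]
    exact hgen k

theorem mc_eq_foldl (L : List Int) :
    mc L = (L.map (fun p => ((PySem.List.count L p : Nat) : Int))).foldl max 0 := by
  unfold mc
  refine maxD_eq_foldl _ ?_
  intro x hx
  rcases List.mem_map.1 hx with ⟨p, _, rfl⟩
  positivity

theorem mc_nonneg (L : List Int) : 0 ≤ mc L := by
  rw [mc_eq_foldl]
  exact (PySem.List.le_foldl_max _ 0).1

theorem mc_nil : mc [] = 0 := rfl

theorem mc_single (n : Int) : mc [n] = 1 := by
  unfold mc
  simp [PySem.List.count_eq, PySem.List.maxD, PySem.List.max?_id_cons]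

-- the key counting lemma: a leading block of k copies of d (d absent from the rest)
-- contributes exactly the multiplicity k
theorem mc_block (k : Nat) (d : Int) (R : List Int) (hk : 1 ≤ k) (hd : d ∉ R) :
    mc (List.replicate k d ++ R) = max (k : Int) (mc R) := by
  have hcd : PySem.List.count (List.replicate k d ++ R) d = k := by
    rw [PySem.List.count_eq, List.count_append, List.count_replicate_self,
        List.count_eq_zero.2 hd]
    omega
  have hcx : ∀ x ∈ R, PySem.List.count (List.replicate k d ++ R) x = PySem.List.count R x := by
    intro x hx
    have hxd : x ≠ d := fun h => hd (h ▸ hx)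
    rw [PySem.List.count_eq, PySem.List.count_eq, List.count_append, List.count_replicate,
        if_neg (by simp only [beq_iff_eq]; exact fun h => hxd h.symm), Nat.zero_add]
  rw [mc_eq_foldl, List.map_append, List.map_replicate, hcd]
  have hmapR : R.map (fun p => ((PySem.List.count (List.replicate k d ++ R) p : Nat) : Int))
      = R.map (fun p => ((PySem.List.count R p : Nat) : Int)) := by
    refine List.map_congr_left ?_
    intro x hx
    rw [hcx x hx]
  rw [hmapR, foldl_max_append, foldl_max_replicate k (k : Int) hk (by positivity)]
  rw [mc_eq_foldl]

-- proof-side views of the two ports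
def afterA (R n mp i : Int) : Int :=
  let st := (PySem.List.pyRange i (R + 1) 1).foldl
      (fun (st : Int × Int) j => let s := stripA j st.1 0; (s.1, max st.2 s.2)) (n, mp)
  if st.1 > 1 then max st.2 1 else st.2

def afterB (n d : Int) : Int := mc (Lfull n d)

theorem afterA_eq (N : Int) :
    max_prime_factor_power N = afterA ((Nat.sqrt N.toNat : Int)) N 0 2 := rfl

theorem afterB_eq (N : Int) : max_prime_factor_power_alt N = afterB N 2 := alt_eq N

-- B's recurrences
theorem afterB_stop (n d : Int) (h : ¬ (2 ≤ d ∧ d * d ≤ n)) :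
    afterB n d = if n > 1 then 1 else 0 := by
  unfold afterB
  rw [Lfull_stop n d h]
  split
  · exact mc_single n
  · exact mc_nil

theorem afterB_skip (n d : Int) (hd : 2 ≤ d) (hdd : d * d ≤ n)
    (hm : ¬ PySem.Int.mod n d = 0) : afterB n d = afterB n (d + 1) := by
  unfold afterB
  rw [Lfull_skip n d hd hdd hm]

theorem afterB_divide (n d : Int) (hd : 2 ≤ d) (hdd : d * d ≤ n)
    (hm : PySem.Int.mod n d = 0) (hinv : ∀ j, 2 ≤ j → j < d → ¬ j ∣ n) :
    afterB n d = max (stripA d n 0).2 (afterB (stripA d n 0).1 (d + 1)) := by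
  have h1 : 1 ≤ n := by nlinarith
  have hE : 1 ≤ (stripA d n 0).2 := stripA_snd_pos d n hd h1 hm
  obtain ⟨⟨hM1, _⟩, _, hMnd, _⟩ := stripA_facts d n 0 hd h1
  have hdnotin : d ∉ Lfull (stripA d n 0).1 (d + 1) := by
    intro hmem
    exact hMnd (Lfull_dvd (stripA d n 0).1 (d + 1) (by omega) hM1 d hmem)
  unfold afterB
  rw [Lfull_divide n.toNat n d le_rfl hd h1 hdd hm hinv]
  rw [mc_block (stripA d n 0).2.toNat d _ (by omega) hdnotin]
  have : (((stripA d n 0).2.toNat : Nat) : Int) = (stripA d n 0).2 := by omega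
  rw [this]

-- A's tail once n < i*i: with no divisor below i, the only divisor left in [i, R] is n itself
theorem tailA_lemma : ∀ (m : Nat) (R i n mp : Int), (R + 1 - i).toNat ≤ m →
    2 ≤ i → 1 ≤ n → 0 ≤ mp → n < i * i → (∀ j, 2 ≤ j → j < i → ¬ j ∣ n) →
    (PySem.List.pyRange i (R + 1) 1).foldl
      (fun (st : Int × Int) j => let s := stripA j st.1 0; (s.1, max st.2 s.2)) (n, mp)
    = if 1 < n ∧ n ≤ R then (1, max mp 1) else (n, mp) := by
  intro m
  induction m with
  | zero =>
    intro R i n mp hm hi h1 hmp hii hnd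
    rw [PySem.List.pyRange_one_eq_nil (by omega)]
    simp only [List.foldl_nil]
    rw [if_neg (by rintro ⟨ha, hb⟩; exact hnd n (by omega) (by omega) dvd_rfl)]
  | succ m ih =>
    intro R i n mp hm hi h1 hmp hii hnd
    by_cases hiR : R + 1 ≤ i
    · rw [PySem.List.pyRange_one_eq_nil (by omega)]
      simp only [List.foldl_nil]
      rw [if_neg (by rintro ⟨ha, hb⟩; exact hnd n (by omega) (by omega) dvd_rfl)]
    · rw [PySem.List.pyRange_one_cons (by omega)]
      simp only [List.foldl_cons]
      by_cases hin : i = n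
      · subst hin
        try dsimp only
        rw [stripA_self i hi]
        try dsimp only
        rw [ih R (i + 1) 1 (max mp 1) (by omega) (by omega) (by omega) (by omega)
          (by nlinarith)
          (by intro j hj _ hd; have := Int.le_of_dvd (by omega) hd; omega)]
        rw [if_neg (by omega), if_pos ⟨by omega, by omega⟩]
      · have hnd' : ¬ i ∣ n := by
          intro hd
          rcases hd with ⟨c, hc⟩
          have hc1 : 1 ≤ c := by
            by_contra hcl
            have : i * c ≤ 0 := mul_nonpos_iff.2 (Or.inl ⟨by omega, by omega⟩)
            omega
          have hc2 : 2 ≤ c := by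
            rcases eq_or_lt_of_le hc1 with hceq | hclt
            · exfalso; apply hin; rw [hc, ← hceq, mul_one]
            · omega
          have hci : c < i := by
            have hthis := hii
            rw [hc] at hthis
            exact lt_of_mul_lt_mul_left hthis (by omega)
          exact hnd c hc2 hci ⟨i, by rw [hc]; ring⟩
        try dsimp only
        rw [stripA_no_dvd_eq i n 0 hnd']
        try dsimp only
        rw [max_eq_left hmp]
        rw [ih R (i + 1) n mp (by omega) (by omega) h1 hmp (by nlinarith)
          (by intro j hj hji hd
              by_cases hji' : j < i
              · exact hnd j hj hji' hd
              · have hji'' : j = i := by omega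
                subst hji''; exact hnd' hd)]

-- main equivalence invariant
theorem main_lemma : ∀ (m : Nat) (R n mp i : Int), (R + 1 - i).toNat ≤ m →
    2 ≤ i → 1 ≤ n → 0 ≤ mp → (∀ j, 2 ≤ j → j < i → ¬ j ∣ n) →
    (Nat.sqrt n.toNat : Int) ≤ R →
    afterA R n mp i = max mp (afterB n i) := by
  intro m
  induction m with
  | zero =>
    intro R n mp i hm hi h1 hmp hnd hsq
    have hiR : R + 1 ≤ i := by omega
    have hii : n < i * i := by
      have h' : Nat.sqrt n.toNat < i.toNat := by omega
      have h'' : n.toNat < i.toNat * i.toNat := by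
        have hpow := Nat.sqrt_lt'.mp h'
        nlinarith [hpow]
      have hcast : ((n.toNat : Int)) < (i.toNat : Int) * (i.toNat : Int) := by exact_mod_cast h''
      have hi' : ((i.toNat : Int)) = i := by omega
      rw [hi'] at hcast
      omega
    unfold afterA
    rw [PySem.List.pyRange_one_eq_nil (by omega)]
    simp only [List.foldl_nil]
    rw [afterB_stop n i (by rintro ⟨_, h⟩; omega)]
    split
    · next h => rfl
    · next h => rw [max_eq_left hmp]
  | succ m ih =>
    intro R n mp i hm hi h1 hmp hnd hsq
    by_cases hiR : R + 1 ≤ i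
    · have hii : n < i * i := by
        have h' : Nat.sqrt n.toNat < i.toNat := by omega
        have h'' : n.toNat < i.toNat * i.toNat := by
          have hpow := Nat.sqrt_lt'.mp h'
          nlinarith [hpow]
        have hcast : ((n.toNat : Int)) < (i.toNat : Int) * (i.toNat : Int) := by exact_mod_cast h''
        have hi' : ((i.toNat : Int)) = i := by omega
        rw [hi'] at hcast
        omega
      unfold afterA
      rw [PySem.List.pyRange_one_eq_nil (by omega)]
      simp only [List.foldl_nil]
      rw [afterB_stop n i (by rintro ⟨_, h⟩; omega)]
      split
      · next h => rfl
      · next h => rw [max_eq_left hmp]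
    · by_cases hii : i * i ≤ n
      · by_cases hmod : PySem.Int.mod n i = 0
        · -- i divides n: both sides strip i completely
          have hlt := stripA_fst_lt i n 0 hi h1 hmod
          obtain ⟨⟨hb1, hb2⟩, hdd, hnd2, _⟩ := stripA_facts i n 0 hi h1
          have hpos := stripA_snd_pos i n hi h1 hmod
          have hstepA : afterA R n mp i = afterA R (stripA i n 0).1 (max mp (stripA i n 0).2) (i + 1) := by
            unfold afterA
            rw [PySem.List.pyRange_one_cons (by omega)]
            simp only [List.foldl_cons]
          rw [hstepA, afterB_divide n i hi hii hmod hnd]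
          rw [ih R (stripA i n 0).1 (max mp (stripA i n 0).2) (i + 1) (by omega)
            (by omega) hb1 (by omega)
            (by intro j hj hji hd
                by_cases hji' : j < i
                · exact hnd j hj hji' (dvd_trans hd hdd)
                · have hji'' : j = i := by omega
                  subst hji''; exact hnd2 hd)
            (by
              have hmono : Nat.sqrt (stripA i n 0).1.toNat ≤ Nat.sqrt n.toNat :=
                Nat.sqrt_le_sqrt (by omega)
              omega)]
          rw [max_assoc]
        · -- i does not divide n: both sides move to i+1
          have hnd' : ¬ i ∣ n := fun hd =>
            hmod ((PySem.Int.mod_eq_zero_iff_dvd n i).2 hd)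
          have hstepA : afterA R n mp i = afterA R n mp (i + 1) := by
            unfold afterA
            rw [PySem.List.pyRange_one_cons (by omega)]
            simp only [List.foldl_cons]
            try dsimp only
            rw [stripA_no_dvd_eq i n 0 hnd']
            try dsimp only
            rw [max_eq_left hmp]
          rw [hstepA, afterB_skip n i hi hii hmod]
          exact ih R n mp (i + 1) (by omega) (by omega) h1 hmp
            (by intro j hj hji hd
                by_cases hji' : j < i
                · exact hnd j hj hji' hd
                · have hji'' : j = i := by omega
                  subst hji''; exact hnd' hd)
            hsq
      · -- n < i*i: A's remaining range only reacts at j = n; B stops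
        rw [not_le] at hii
        unfold afterA
        rw [tailA_lemma ((R + 1 - i).toNat) R i n mp le_rfl hi h1 hmp hii hnd]
        rw [afterB_stop n i (by rintro ⟨_, h⟩; omega)]
        by_cases hc : 1 < n ∧ n ≤ R
        · rw [if_pos hc]
          try dsimp only
          rw [if_neg (by omega), if_pos (by omega)]
        · rw [if_neg hc]
          try dsimp only
          split
          · next h => rfl
          · next h => rw [max_eq_left hmp]

-- ===== VERDICT (by name: the statement is the Claim_ definition above) =====
theorem max_prime_factor_power_spec : Claim_equal_max_prime_factor_power := by
  intro N _ hpre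
  unfold Pre_max_prime_factor_power at hpre
  unfold Spec_max_prime_factor_power
  rw [afterA_eq, afterB_eq N]
  by_cases h1 : 1 ≤ N
  · rw [main_lemma (((Nat.sqrt N.toNat : Int) + 1 - 2).toNat) ((Nat.sqrt N.toNat : Int))
      N 0 2 le_rfl (by omega) h1 le_rfl (by intro j hj hji _; omega) le_rfl]
    rw [max_eq_right (show (0:Int) ≤ afterB N 2 from mc_nonneg (Lfull N 2))]
  · have hN0 : N = 0 := by omega
    subst hN0
    unfold afterA
    rw [show ((Nat.sqrt (Int.toNat 0) : Int)) = 0 by decide]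
    rw [PySem.List.pyRange_one_eq_nil (by omega)]
    simp only [List.foldl_nil]
    rw [afterB_stop 0 2 (by rintro ⟨_, h⟩; omega)]
    norm_num
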